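-- pv_equiv track=rewrite | github.com/rio7710/eduPlan | scripts/finalize_review_transfer.py | compress_page_metadata
-- ===== SOURCE A (Python) =====
-- def compress_page_metadata(entries: list[tuple[str, str]]) -> list[str]:
--     if not entries:
--         return []
--
--     compressed: list[str] = []
--     range_start = entries[0][0]
--     range_end = entries[0][0]
--     current_source = entries[0][1]
--
--     for page_number, source_value in entries[1:]:
--         try:
--             prev_num = int(range_end)
--             next_num = int(page_number)
--         except ValueError:
--             prev_num = None
--             next_num = None
--
--         is_contiguous = prev_num is not None and next_num is not None and next_num == prev_num + 1
--         if source_value == current_source and is_contiguous: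
--             range_end = page_number
--             continue
--
--         page_label = f"Page {range_start}" if range_start == range_end else f"Page {range_start}-{range_end}"
--         compressed.append(f"- {page_label} | source: {current_source or 'unknown'}")
--         range_start = page_number
--         range_end = page_number
--         current_source = source_value
--
--     page_label = f"Page {range_start}" if range_start == range_end else f"Page {range_start}-{range_end}"
--     compressed.append(f"- {page_label} | source: {current_source or 'unknown'}")
--     return compressed
-- ===== SOURCE B (Python) =====
-- def _contiguous(prev: str, nxt: str) -> bool:
--     try:
--         return int(nxt) == int(prev) + 1
--     except ValueError:
--         return False
--
--
-- def compress_page_metadata(entries: list[tuple[str, str]]) -> list[str]: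
--     # Build the run list back-to-front: walk the entries in reverse, either
--     # absorbing the entry as the new start of the front run or prepending a
--     # fresh singleton run; then format the runs in a separate pass.
--     runs: list[tuple[str, str, str]] = []
--     for page, source in reversed(entries):
--         if runs and runs[0][2] == source and _contiguous(page, runs[0][0]):
--             runs[0] = (page, runs[0][1], source)
--         else:
--             runs = [(page, page, source)] + runs
--     out: list[str] = []
--     for start, end, src in runs:
--         label = f"Page {start}" if start == end else f"Page {start}-{end}"
--         out.append(f"- {label} | source: {src or 'unknown'}")
--     return out
-- ===== Notes on version B (the rewrite author's own statement) =====
-- stated objective: alternative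
-- what changed: B traverses the entries in reverse, building the run list back-to-front by extending the start of the front run or prepending a singleton run, then formats the runs in a separate pass; A is a forward fused loop threading range_start/range_end/current_source state and emitting each label as it closes a run.
import Mathlib
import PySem

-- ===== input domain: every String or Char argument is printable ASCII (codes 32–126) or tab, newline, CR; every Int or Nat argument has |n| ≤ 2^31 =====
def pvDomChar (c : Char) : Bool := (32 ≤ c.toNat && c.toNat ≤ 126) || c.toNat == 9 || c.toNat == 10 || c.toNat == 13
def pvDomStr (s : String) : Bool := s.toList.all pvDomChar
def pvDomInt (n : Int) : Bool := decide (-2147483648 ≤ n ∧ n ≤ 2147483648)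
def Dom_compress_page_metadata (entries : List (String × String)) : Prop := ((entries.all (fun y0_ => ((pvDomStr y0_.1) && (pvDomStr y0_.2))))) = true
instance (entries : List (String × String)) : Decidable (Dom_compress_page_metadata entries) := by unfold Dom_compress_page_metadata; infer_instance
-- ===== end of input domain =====

-- B builds the run list back-to-front (reverse traversal, prepending/extending the front run)
-- and formats it in a separate pass; same return value as A's forward fused loop (objective: alternative).

-- ===== PORT A =====
-- loop body of A: state = (compressed, range_start, range_end, current_source)
def pvStepA (st : List String × String × String × String) (pv : String × String) :
    List String × String × String × String :=
  let contig :=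
    match PySem.Int.ofStr? st.2.2.1, PySem.Int.ofStr? pv.1 with
    | some prev, some next => next == prev + 1
    | _, _ => false
  if pv.2 == st.2.2.2 && contig then
    (st.1, st.2.1, pv.1, st.2.2.2)
  else
    let label := if st.2.1 == st.2.2.1 then "Page " ++ st.2.1
                 else "Page " ++ st.2.1 ++ "-" ++ st.2.2.1
    (st.1 ++ ["- " ++ label ++ " | source: " ++ (if st.2.2.2 == "" then "unknown" else st.2.2.2)],
     pv.1, pv.1, pv.2)

def compress_page_metadata (entries : List (String × String)) : List String :=
  match entries with
  | [] => []
  | (p0, s0) :: rest =>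
      let st := rest.foldl pvStepA ([], p0, p0, s0)
      let label := if st.2.1 == st.2.2.1 then "Page " ++ st.2.1
                   else "Page " ++ st.2.1 ++ "-" ++ st.2.2.1
      st.1 ++ ["- " ++ label ++ " | source: " ++ (if st.2.2.2 == "" then "unknown" else st.2.2.2)]

-- ===== PORT B =====
-- Source B _contiguous: int(nxt) == int(prev) + 1, ValueError -> False
def pvContig (prev nxt : String) : Bool :=
  match PySem.Int.ofStr? prev, PySem.Int.ofStr? nxt with
  | some p, some n => n == p + 1
  | _, _ => false

-- Source B reversed-loop body: absorb the entry into the front run or prepend a singleton run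
def pvStepR (pv : String × String) (runs : List (String × String × String)) :
    List (String × String × String) :=
  match runs with
  | r :: rs =>
      if r.2.2 == pv.2 && pvContig pv.1 r.1 then
        (pv.1, r.2.1, pv.2) :: rs
      else
        (pv.1, pv.1, pv.2) :: r :: rs
  | [] => [(pv.1, pv.1, pv.2)]

-- Source B formatting pass for one run record (start, end, source)
def pvFmt (seg : String × String × String) : String :=
  "- " ++ (if seg.1 == seg.2.1 then "Page " ++ seg.1 else "Page " ++ seg.1 ++ "-" ++ seg.2.1)
  ++ " | source: " ++ (if seg.2.2 == "" then "unknown" else seg.2.2)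

def compress_page_metadata_alt (entries : List (String × String)) : List String :=
  (entries.reverse.foldl (fun rs pv => pvStepR pv rs) []).map pvFmt

-- ===== PRECONDITION & SPEC =====
def Spec_compress_page_metadata (entries : List (String × String)) (out : List String) : Prop := out = compress_page_metadata_alt entries
instance (entries : List (String × String)) (out : List String) : Decidable (Spec_compress_page_metadata entries out) := by unfold Spec_compress_page_metadata; infer_instance

-- ===== CLAIM =====
def Claim_equal_compress_page_metadata : Prop := ∀ (entries : List (String × String)), Dom_compress_page_metadata entries → Spec_compress_page_metadata entries (compress_page_metadata entries)

-- ===== LEMMAS AND PROOFS =====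

-- Proof-side forward run builder: A's loop is in lockstep with it (pvLoop), and it
-- equals B's backward builder (pvFoldlFoldr).
def pvStepB (segs : List (String × String × String)) (pv : String × String) :
    List (String × String × String) :=
  match segs.getLast? with
  | some seg =>
      if seg.2.2 == pv.2 && pvContig seg.2.1 pv.1 then
        segs.dropLast ++ [(seg.1, pv.1, pv.2)]
      else
        segs ++ [(pv.1, pv.1, pv.2)]
  | none => segs ++ [(pv.1, pv.1, pv.2)]

-- A's fold carrying (segs0.map pvFmt, rs, re, cs) and the forward builder carrying
-- segs0 ++ [(rs, re, cs)] stay in lockstep; finalizing A's state yields the map.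
lemma pvLoop (rest : List (String × String)) :
    ∀ (segs0 : List (String × String × String)) (rs re cs : String),
      (let st := rest.foldl pvStepA (segs0.map pvFmt, rs, re, cs)
       st.1 ++ [pvFmt (st.2.1, st.2.2.1, st.2.2.2)])
      = (rest.foldl pvStepB (segs0 ++ [(rs, re, cs)])).map pvFmt := by
  induction rest with
  | nil =>
      intro segs0 rs re cs
      simp [pvFmt]
  | cons pv rest ih =>
      intro segs0 rs re cs
      simp only [List.foldl_cons]
      have hc : (match PySem.Int.ofStr? re, PySem.Int.ofStr? pv.1 with
          | some prev, some next => next == prev + 1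
          | _, _ => false) = pvContig re pv.1 := rfl
      by_cases h : (pv.2 == cs && pvContig re pv.1) = true
      · have hA : pvStepA (segs0.map pvFmt, rs, re, cs) pv = (segs0.map pvFmt, rs, pv.1, cs) := by
          simp only [pvStepA, hc]
          simp [h]
        have hB : pvStepB (segs0 ++ [(rs, re, cs)]) pv = segs0 ++ [(rs, pv.1, pv.2)] := by
          simp only [pvStepB, List.getLast?_concat]
          have h' : (cs == pv.2 && pvContig re pv.1) = true := by
            rw [Bool.beq_comm]; exact h
          simp [h']
        rw [hA, hB]
        have hcs : pv.2 = cs := eq_of_beq ((Bool.and_eq_true ..).mp h).1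
        rw [← hcs]
        exact ih segs0 rs pv.1 pv.2
      · have hA : pvStepA (segs0.map pvFmt, rs, re, cs) pv
            = (segs0.map pvFmt ++ [pvFmt (rs, re, cs)], pv.1, pv.1, pv.2) := by
          simp only [pvStepA, hc, pvFmt]
          simp [h]
        have hB : pvStepB (segs0 ++ [(rs, re, cs)]) pv
            = (segs0 ++ [(rs, re, cs)]) ++ [(pv.1, pv.1, pv.2)] := by
          simp only [pvStepB, List.getLast?_concat]
          have h' : (cs == pv.2 && pvContig re pv.1) = false := by
            rw [Bool.beq_comm]; simpa using h
          simp [h']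
        rw [hA, hB]
        simpa [pvFmt] using ih (segs0 ++ [(rs, re, cs)]) pv.1 pv.1 pv.2

-- the forward builder never touches runs before the last one
lemma pvFrozen (l : List (String × String)) :
    ∀ (s0 t : List (String × String × String)), t ≠ [] →
      List.foldl pvStepB (s0 ++ t) l = s0 ++ List.foldl pvStepB t l := by
  induction l with
  | nil => intro s0 t _; simp
  | cons pv l ih =>
      intro s0 t ht
      have hd : (s0 ++ t).dropLast = s0 ++ t.dropLast :=
        List.dropLast_append_of_ne_nil ht
      have hstep : pvStepB (s0 ++ t) pv = s0 ++ pvStepB t pv := by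
        cases hgl : t.getLast? with
        | none => exact absurd (List.getLast?_eq_none_iff.mp hgl) ht
        | some seg =>
            simp only [pvStepB, List.getLast?_append_of_ne_nil _ ht, hgl, hd]
            split <;> simp
      have hne : pvStepB t pv ≠ [] := by
        cases hgl : t.getLast? with
        | none => simp [pvStepB, hgl]
        | some seg =>
            simp only [pvStepB, hgl]
            split <;> simp
      simp only [List.foldl_cons, hstep]
      exact ih s0 (pvStepB t pv) hne

-- the first run's start is inert: its end and the remaining runs do not depend on it
lemma pvA1 (l : List (String × String)) :
    ∀ (q s : String), ∃ E rs, ∀ p,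
      List.foldl pvStepB [(p, q, s)] l = (p, E, s) :: rs := by
  induction l with
  | nil => intro q s; exact ⟨q, [], fun p => rfl⟩
  | cons pv l ih =>
      intro q s
      by_cases h : (s == pv.2 && pvContig q pv.1) = true
      · have hs : s = pv.2 := eq_of_beq ((Bool.and_eq_true ..).mp h).1
        obtain ⟨E, rs, hP⟩ := ih pv.1 pv.2
        refine ⟨E, rs, fun p => ?_⟩
        have hstep : pvStepB [(p, q, s)] pv = [(p, pv.1, pv.2)] := by
          simp [pvStepB, h]
        rw [List.foldl_cons, hstep, hP p, hs]
      · refine ⟨q, List.foldl pvStepB [(pv.1, pv.1, pv.2)] l, fun p => ?_⟩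
        have hstep : pvStepB [(p, q, s)] pv = [(p, q, s)] ++ [(pv.1, pv.1, pv.2)] := by
          simp [pvStepB, h]
        rw [List.foldl_cons, hstep, pvFrozen l [(p, q, s)] [(pv.1, pv.1, pv.2)] (by simp)]
        rfl

-- prepending a fresh entry to the forward fold = one backward step on the fold's result
lemma pvA2 (l : List (String × String)) :
    ∀ (p s : String),
      List.foldl pvStepB [(p, p, s)] l = pvStepR (p, s) (List.foldl pvStepB [] l) := by
  induction l with
  | nil => intro p s; rfl
  | cons pv l ih =>
      intro p s
      obtain ⟨E, rs, hP⟩ := pvA1 l pv.1 pv.2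
      have h0 : List.foldl pvStepB [] (pv :: l) = (pv.1, E, pv.2) :: rs := by
        have : pvStepB [] pv = [(pv.1, pv.1, pv.2)] := rfl
        rw [List.foldl_cons, this, hP pv.1]
      by_cases h : (s == pv.2 && pvContig p pv.1) = true
      · have hs : s = pv.2 := eq_of_beq ((Bool.and_eq_true ..).mp h).1
        have hstep : pvStepB [(p, p, s)] pv = [(p, pv.1, pv.2)] := by
          simp [pvStepB, h]
        have hR : (pv.2 == s && pvContig p pv.1) = true := by
          rw [Bool.beq_comm]; exact h
        have hcontig : pvContig p pv.1 = true := ((Bool.and_eq_true ..).mp h).2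
        rw [List.foldl_cons, hstep, hP p, h0]
        simp [pvStepR, hs, hcontig]
      · have hstep : pvStepB [(p, p, s)] pv = [(p, p, s)] ++ [(pv.1, pv.1, pv.2)] := by
          simp [pvStepB, h]
        have hR : (pv.2 == s && pvContig p pv.1) = false := by
          rw [Bool.beq_comm]; simpa using h
        rw [List.foldl_cons, hstep,
          pvFrozen l [(p, p, s)] [(pv.1, pv.1, pv.2)] (by simp), hP pv.1, h0]
        simp [pvStepR, hR]

-- forward and backward run builders agree
lemma pvFoldlFoldr (l : List (String × String)) :
    List.foldl pvStepB [] l = List.foldr pvStepR [] l := by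
  induction l with
  | nil => rfl
  | cons pv l ih =>
      have : pvStepB [] pv = [(pv.1, pv.1, pv.2)] := rfl
      rw [List.foldl_cons, this, pvA2 l pv.1 pv.2, ih, List.foldr_cons]

-- ===== VERDICT =====
theorem compress_page_metadata_spec : Claim_equal_compress_page_metadata := by
  intro entries _
  unfold Spec_compress_page_metadata
  have halt : compress_page_metadata_alt entries
      = (List.foldl pvStepB [] entries).map pvFmt := by
    unfold compress_page_metadata_alt
    rw [List.foldl_reverse, pvFoldlFoldr]
  rw [halt]
  match entries with
  | [] => rfl
  | (p0, s0) :: rest =>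
      have hB0 : pvStepB [] (p0, s0) = [(p0, p0, s0)] := rfl
      have := pvLoop rest [] p0 p0 s0
      simp only [List.map_nil, List.nil_append] at this
      simpa [compress_page_metadata, hB0, pvFmt] using this
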